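-- pv_equiv track=rewrite | github.com/jbpease/mixtape | mixcore.py | untranslate
-- ===== SOURCE A (Python) =====
-- def untranslate(amino_acids, nucleotides, firststop=False):
--     """Converts an aligned amino acid sequence
--     back to codons while maintaining gaps"""
--     nucleotides = nucleotides.strip().replace('-', '')
--     codons = ''
--     j = 0
--     for i in range(len(amino_acids)):
--         if amino_acids[i] == '*' and firststop:
--             return codons
--         elif amino_acids[i] == '-':
--             codons += '---'
--         else:
--             codons += nucleotides[j:j+3]
--             j += 3
--     return codons
-- ===== SOURCE B (Python) =====
-- def untranslate(amino_acids, nucleotides, firststop=False):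
--     """Converts an aligned amino acid sequence
--     back to codons while maintaining gaps"""
--     nucleotides = nucleotides.strip().replace('-', '')
--     if firststop and '*' in amino_acids:
--         amino_acids = amino_acids[:amino_acids.index('*')]
--     # fill-then-overwrite: start with a gap codon in every slot, then write the
--     # r-th codon (a closed-form slice at 3*r) into the r-th coding position
--     out = ['---'] * len(amino_acids)
--     coding = [i for i, aa in enumerate(amino_acids) if aa != '-']
--     for r, i in enumerate(coding):
--         out[i] = nucleotides[3 * r:3 * r + 3]
--     return ''.join(out)
-- ===== Notes on version B (the rewrite author's own statement) =====
-- stated objective: alternative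
-- what changed: A's single stateful loop (guarded early return, growing codons string, mutable nucleotide cursor j) is replaced by a fill-then-overwrite construction: truncate at the first '*' up front, pre-fill a slot list with '---' for every position, extract the list of coding (non-gap) positions, and write the r-th codon via the closed-form slice nucleotides[3r:3r+3] into the r-th coding position by random-access index assignment, joining once at the end.
import Mathlib
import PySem

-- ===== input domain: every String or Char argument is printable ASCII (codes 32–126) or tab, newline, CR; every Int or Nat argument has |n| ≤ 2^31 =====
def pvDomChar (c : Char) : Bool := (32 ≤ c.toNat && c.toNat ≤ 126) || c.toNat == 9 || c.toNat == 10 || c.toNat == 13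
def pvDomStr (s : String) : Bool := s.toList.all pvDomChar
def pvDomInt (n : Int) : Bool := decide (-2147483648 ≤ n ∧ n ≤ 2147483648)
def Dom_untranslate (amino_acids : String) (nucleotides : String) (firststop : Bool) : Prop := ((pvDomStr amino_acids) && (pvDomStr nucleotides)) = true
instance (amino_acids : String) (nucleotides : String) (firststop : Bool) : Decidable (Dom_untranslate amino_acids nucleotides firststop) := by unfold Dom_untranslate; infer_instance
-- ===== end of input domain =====

-- B replaces A's single stateful accumulator loop (guarded early return, running codons
-- string, mutable j) by a fill-then-overwrite construction: truncate at the first '*' up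
-- front, pre-fill every slot with '---', list the coding positions, and write the r-th
-- codon nucleotides[3r:3r+3] into the r-th coding position by index arithmetic (alternative).

-- ===== PORT A =====
-- the loop 'for i in range(len(amino_acids))' with early return, codons and j as state
def untranslateGoA (nuc : List Char) (firststop : Bool) :
    List Char → Nat → String → String
  | [], _, codons => codons
  | c :: rest, j, codons =>
    if c = '*' ∧ firststop = true then codons
    else if c = '-' then untranslateGoA nuc firststop rest j (codons ++ "---")
    else untranslateGoA nuc firststop rest (j + 3)
      (codons ++ String.mk (PySem.List.slice nuc (some (j : Int)) (some ((j : Int) + 3))))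

def untranslate (amino_acids : String) (nucleotides : String) (firststop : Bool) : String :=
  let nuc := (PySem.Str.replace (PySem.Str.strip nucleotides) "-" "").toList
  untranslateGoA nuc firststop amino_acids.toList 0 ""

-- ===== PORT B =====
-- nucleotides[3*r : 3*r+3]
def pvChunk (nuc : List Char) (j : Int) : String :=
  String.mk (PySem.List.slice nuc (some j) (some (j + 3)))

def untranslate_alt (amino_acids : String) (nucleotides : String) (firststop : Bool) : String :=
  let nuc := (PySem.Str.replace (PySem.Str.strip nucleotides) "-" "").toList
  -- "if firststop and '*' in amino_acids: amino_acids = amino_acids[:amino_acids.index('*')]"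
  let aas :=
    if firststop then
      match PySem.List.index? amino_acids.toList '*' with
      | some i => amino_acids.toList.take i
      | none => amino_acids.toList
    else amino_acids.toList
  -- out = ['---'] * len(amino_acids)
  let out0 : List String := List.replicate aas.length "---"
  -- coding = [i for i, aa in enumerate(amino_acids) if aa != '-']
  let coding : List Int :=
    ((PySem.List.enumerate aas).filter (fun p => p.2 != '-')).map Prod.fst
  -- for r, i in enumerate(coding): out[i] = nucleotides[3*r:3*r+3]
  let out := (PySem.List.enumerate coding).foldl
      (fun o p => PySem.List.pySetD o p.2 (pvChunk nuc (3 * p.1))) out0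
  String.join out

-- ===== PRECONDITION & SPEC =====
def Spec_untranslate (amino_acids : String) (nucleotides : String) (firststop : Bool) (out : String) : Prop := out = untranslate_alt amino_acids nucleotides firststop
instance (amino_acids : String) (nucleotides : String) (firststop : Bool) (out : String) : Decidable (Spec_untranslate amino_acids nucleotides firststop out) := by unfold Spec_untranslate; infer_instance

-- ===== CLAIM (what is proved, stated in full; the proofs are below) =====
def Claim_equal_untranslate : Prop := ∀ (amino_acids : String) (nucleotides : String) (firststop : Bool), Dom_untranslate amino_acids nucleotides firststop → Spec_untranslate amino_acids nucleotides firststop (untranslate amino_acids nucleotides firststop)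

-- ===== LEMMAS AND PROOFS =====

-- the common specification: list of pieces, r-th codon for the r-th coding residue
def specB (nuc : List Char) : List Char → Nat → List String
  | [], _ => []
  | c :: rest, r =>
    if c = '-' then "---" :: specB nuc rest r
    else pvChunk nuc (3 * (r : Int)) :: specB nuc rest (r + 1)

theorem foldl_append_shift (l : List String) : ∀ (s : String),
    l.foldl (· ++ ·) s = s ++ l.foldl (· ++ ·) "" := by
  induction l with
  | nil => intro s; simp
  | cons x xs ih =>
    intro s
    simp only [List.foldl_cons]
    rw [ih (s ++ x), ih ("" ++ x), String.append_assoc]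
    simp

theorem join_cons (s : String) (l : List String) :
    String.join (s :: l) = s ++ String.join l := by
  simp only [String.join, List.foldl_cons]
  rw [foldl_append_shift l ("" ++ s)]
  simp

-- B's slice-at-index truncation is the prefix before the first '*'
theorem take_index?_eq_takeWhile (l : List Char) :
    (match PySem.List.index? l '*' with
      | some i => l.take i
      | none => l) = l.takeWhile (· ≠ '*') := by
  induction l with
  | nil => simp [PySem.List.index?]
  | cons c rest ih =>
    by_cases hc : c = '*'
    · subst hc
      rw [PySem.List.index?_cons_self]
      simp [List.takeWhile]
    · rw [PySem.List.index?_cons_of_ne rest hc]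
      cases h : PySem.List.index? rest '*' with
      | none =>
        simp only [h] at ih
        simp only [List.takeWhile, hc, ne_eq, not_false_eq_true]
        simpa using ih
      | some i =>
        simp only [h] at ih
        simp only [Option.map_some, List.takeWhile]
        simp [hc]
        simpa using ih

-- ===== A side: the accumulator loop computes the joined spec pieces =====

-- with firststop = false the early return never fires
theorem goA_false (nuc : List Char) (l : List Char) :
    ∀ (r : Nat) (acc : String),
      untranslateGoA nuc false l (3 * r) acc = acc ++ String.join (specB nuc l r) := by
  induction l with
  | nil => intro r acc; simp [untranslateGoA, specB, String.join]
  | cons c rest ih =>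
    intro r acc
    by_cases hc : c = '-'
    · simp [untranslateGoA, specB, hc, ih, join_cons, String.append_assoc]
    · have h3 : 3 * r + 3 = 3 * (r + 1) := by ring
      have hcast : ((3 * r : Nat) : Int) = 3 * (r : Int) := by push_cast; ring
      simp only [untranslateGoA, hc, and_false, Bool.false_eq_true, if_false, specB,
        h3, ih, join_cons, hcast, pvChunk, String.append_assoc]

-- with firststop = true A runs exactly over the prefix before the first '*'
theorem goA_true (nuc : List Char) (l : List Char) :
    ∀ (r : Nat) (acc : String),
      untranslateGoA nuc true l (3 * r) acc
        = acc ++ String.join (specB nuc (l.takeWhile (· ≠ '*')) r) := by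
  induction l with
  | nil => intro r acc; simp [untranslateGoA, specB, String.join]
  | cons c rest ih =>
    intro r acc
    by_cases hs : c = '*'
    · simp [untranslateGoA, hs, List.takeWhile, specB, String.join]
    · by_cases hc : c = '-'
      · simp [untranslateGoA, List.takeWhile, hc, specB, ih, join_cons, String.append_assoc]
      · have h3 : 3 * r + 3 = 3 * (r + 1) := by ring
        have hcast : ((3 * r : Nat) : Int) = 3 * (r : Int) := by push_cast; ring
        simp [untranslateGoA, List.takeWhile, hs, hc, specB, h3, ih, join_cons,
          hcast, pvChunk, String.append_assoc]

-- ===== B side: the fill-then-overwrite fold computes the spec pieces =====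

-- pulling the head of the output list through a fold of in-bounds writes
theorem foldl_set_cons (g : Int × Int → String) (idx : Int × Int → Int)
    (pairs : List (Int × Int)) :
    ∀ (x : String) (out : List String), (∀ p ∈ pairs, 1 ≤ idx p) →
      pairs.foldl (fun o p => PySem.List.pySetD o (idx p) (g p)) (x :: out)
        = x :: pairs.foldl (fun o p => PySem.List.pySetD o (idx p - 1) (g p)) out := by
  induction pairs with
  | nil => intro x out _; simp
  | cons p ps ih =>
    intro x out h
    have hp : 1 ≤ idx p := h p (by simp)
    have h1 : PySem.List.pySetD (x :: out) (idx p) (g p)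
        = x :: PySem.List.pySetD out (idx p - 1) (g p) := by
      rw [PySem.List.pySetD_of_nonneg _ _ (by omega : (0:Int) ≤ idx p),
        PySem.List.pySetD_of_nonneg _ _ (by omega : (0:Int) ≤ idx p - 1)]
      have hk : (idx p).toNat = (idx p - 1).toNat + 1 := by omega
      rw [hk]
      rfl
    simp only [List.foldl_cons, h1]
    exact ih _ _ (fun q hq => h q (List.mem_cons_of_mem _ hq))

-- every coding position extracted from an enumeration starting at t is ≥ t
theorem coding_mem_ge (pr : Int × Char → Bool) (rest : List Char) (t : Int) :
    ∀ i ∈ ((PySem.List.enumerate rest t).filter pr).map Prod.fst, t ≤ i := by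
  intro i hi
  rcases List.mem_map.1 hi with ⟨q, hq, rfl⟩
  have hq' := (List.mem_filter.1 hq).1
  obtain ⟨k, hk, rfl⟩ := (PySem.List.mem_enumerate_iff _ _ _).1 hq'
  simp

-- the second components of the outer enumeration are the coding positions themselves
theorem snd_mem_of_mem_enumerate {α : Type} (cs : List α) (s : Int) :
    ∀ p ∈ PySem.List.enumerate cs s, p.2 ∈ cs := by
  intro p hp
  obtain ⟨k, hk, rfl⟩ := (PySem.List.mem_enumerate_iff _ _ _).1 hp
  simp

-- the fold over the enumerated coding positions builds exactly the spec pieces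
theorem fill (nuc : List Char) (l : List Char) :
    ∀ (s : Nat) (r0 : Nat),
      (PySem.List.enumerate
          (((PySem.List.enumerate l (s : Int)).filter (fun p => p.2 != '-')).map Prod.fst)
          (r0 : Int)).foldl
        (fun o p => PySem.List.pySetD o (p.2 - (s : Int)) (pvChunk nuc (3 * p.1)))
        (List.replicate l.length "---")
      = specB nuc l r0 := by
  induction l with
  | nil => intro s r0; simp [PySem.List.enumerate_nil, specB]
  | cons c rest ih =>
    intro s r0
    have hmem : ∀ s' : Int, ∀ p ∈ PySem.List.enumerate
        (((PySem.List.enumerate rest ((s : Int) + 1)).filter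
          (fun p => p.2 != '-')).map Prod.fst) s',
        1 ≤ p.2 - (s : Int) := by
      intro s' p hp
      have h2 := coding_mem_ge (fun p => p.2 != '-') rest ((s : Int) + 1) p.2
        (snd_mem_of_mem_enumerate _ _ p hp)
      omega
    have hrep : List.replicate (c :: rest).length "---"
        = "---" :: List.replicate rest.length "---" := by
      simp [List.replicate_succ]
    have ih' : ∀ r0' : Nat,
        (PySem.List.enumerate
            (((PySem.List.enumerate rest ((s : Int) + 1)).filter
              (fun p => p.2 != '-')).map Prod.fst) ((r0' : Nat) : Int)).foldl
          (fun o p => PySem.List.pySetD o (p.2 - (s : Int) - 1) (pvChunk nuc (3 * p.1)))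
          (List.replicate rest.length "---")
        = specB nuc rest r0' := by
      intro r0'
      have h := ih (s + 1) r0'
      push_cast at h
      simpa only [sub_sub] using h
    rw [PySem.List.enumerate_cons, hrep]
    by_cases hc : c = '-'
    · -- gap head: dropped by the filter, the '---' slot is never overwritten
      rw [List.filter_cons_of_neg (by simp [hc])]
      rw [foldl_set_cons _ _ _ _ _ (hmem _)]
      rw [ih' r0]
      simp [specB, hc]
    · -- coding head: the r0-th codon is written into slot 0, the rest shift by one
      rw [List.filter_cons_of_pos (by simp [hc]), List.map_cons,
        PySem.List.enumerate_cons, List.foldl_cons]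
      have h0 : PySem.List.pySetD ("---" :: List.replicate rest.length "---")
            ((s : Int) - (s : Int)) (pvChunk nuc (3 * (r0 : Int)))
          = pvChunk nuc (3 * (r0 : Int)) :: List.replicate rest.length "---" := by
        rw [sub_self, PySem.List.pySetD_of_nonneg _ _ le_rfl]
        rfl
      rw [h0, foldl_set_cons _ _ _ _ _ (hmem _)]
      have h1 : ((r0 : Int) + 1) = (((r0 + 1 : Nat) : Nat) : Int) := by push_cast; ring
      rw [h1, ih' (r0 + 1)]
      simp [specB, hc]

-- ===== VERDICT (by name: the statement is the Claim_ definition above) =====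
-- instantiating fill at s = 0, r0 = 0 gives the port's own fold
theorem fill0 (nuc : List Char) (l : List Char) :
    (PySem.List.enumerate
        (((PySem.List.enumerate l).filter (fun p => p.2 != '-')).map Prod.fst)).foldl
      (fun o p => PySem.List.pySetD o p.2 (pvChunk nuc (3 * p.1)))
      (List.replicate l.length "---")
    = specB nuc l 0 := by
  have h := fill nuc l 0 0
  simpa using h

theorem untranslate_spec : Claim_equal_untranslate := by
  intro amino_acids nucleotides firststop _
  unfold Spec_untranslate untranslate untranslate_alt
  dsimp only
  cases firststop with
  | false =>
    rw [if_neg (by simp)]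
    rw [fill0]
    have h := goA_false ((PySem.Str.replace (PySem.Str.strip nucleotides) "-" "").toList)
      amino_acids.toList 0 ""
    simpa using h
  | true =>
    rw [if_pos rfl, take_index?_eq_takeWhile, fill0]
    have h := goA_true ((PySem.Str.replace (PySem.Str.strip nucleotides) "-" "").toList)
      amino_acids.toList 0 ""
    simpa using h
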